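-- pv_equiv track=rewrite | github.com/KamilBourouiba/opctcg-rl-simulator | scripts/fetch_egman_tournament_decks.py | _parse_deck_query
-- ===== SOURCE A (Python) =====
-- def _parse_deck_query(deck_param: str) -> list[tuple[str, int]]:
--     """``EB03-055:4,OP11-041:1`` → [('EB03-055', 4), ('OP11-041', 1)] en conservant l’ordre (fusion des doublons)."""
--     out: list[tuple[str, int]] = []
--     seen: dict[str, int] = {}
--     for part in deck_param.split(","):
--         part = part.strip()
--         if not part:
--             continue
--         if ":" not in part:
--             continue
--         code, _, qty_s = part.partition(":")
--         code = code.strip().upper()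
--         if not code:
--             continue
--         try:
--             qty = int(qty_s.strip())
--         except ValueError:
--             continue
--         if qty <= 0:
--             continue
--         if code in seen:
--             i = seen[code]
--             oc, oq = out[i]
--             out[i] = (oc, oq + qty)
--         else:
--             seen[code] = len(out)
--             out.append((code, qty))
--     return out
-- ===== SOURCE B (Python) =====
-- def _parse_deck_query(deck_param: str) -> list[tuple[str, int]]:
--     """``EB03-055:4,OP11-041:1`` -> [('EB03-055', 4), ('OP11-041', 1)]; duplicates merged, first-seen order kept."""
--     # Stage 1: parse every valid entry (duplicates included).
--     pairs: list[tuple[str, int]] = []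
--     for part in deck_param.split(","):
--         part = part.strip()
--         if not part or ":" not in part:
--             continue
--         code, _, qty_s = part.partition(":")
--         code = code.strip().upper()
--         if not code:
--             continue
--         try:
--             qty = int(qty_s.strip())
--         except ValueError:
--             continue
--         if qty > 0:
--             pairs.append((code, qty))
--     # Stage 2: for each first occurrence of a code, total its quantities.
--     out: list[tuple[str, int]] = []
--     for i, (code, _) in enumerate(pairs):
--         if all(c != code for c, _ in pairs[:i]):
--             out.append((code, sum(q for c, q in pairs if c == code)))
--     return out
-- ===== Notes on version B (the rewrite author's own statement) =====
-- stated objective: alternative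
-- what changed: Replaces A's on-line merging (out-list plus seen->index dict with an in-place tuple rewrite for duplicates) by two staged passes with no dict at all: first collect every valid (code, qty) pair, then for each first occurrence of a code emit (code, sum over all its occurrences).
import Mathlib
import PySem

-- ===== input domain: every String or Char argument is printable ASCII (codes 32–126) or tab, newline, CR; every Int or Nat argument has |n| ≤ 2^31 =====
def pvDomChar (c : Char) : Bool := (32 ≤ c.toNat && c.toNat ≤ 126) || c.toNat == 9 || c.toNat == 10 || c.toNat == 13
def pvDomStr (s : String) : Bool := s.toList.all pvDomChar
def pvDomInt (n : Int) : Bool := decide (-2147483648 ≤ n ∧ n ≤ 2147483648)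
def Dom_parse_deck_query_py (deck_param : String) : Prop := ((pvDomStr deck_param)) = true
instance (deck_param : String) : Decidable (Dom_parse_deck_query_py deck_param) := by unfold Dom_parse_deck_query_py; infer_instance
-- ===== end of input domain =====

-- B replaces A's on-line merging (out-list + seen→index dict, in-place rewrite on duplicates)
-- by two staged passes with no dict: collect all valid (code, qty) pairs, then for each first
-- occurrence of a code emit the total of its quantities (alternative decomposition, same value).

-- ===== PORT A =====
-- Loop body of A. part.partition(":") is ported by hand via find + slices (exact here:
-- it runs only after the check ':' in part, so find ≥ 0 and the three pieces are part[:i], ':', part[i+1:]).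
def pvStepA (st : List (String × Int) × PySem.Dict String Int) (part0 : String) :
    List (String × Int) × PySem.Dict String Int :=
  let part := PySem.Str.strip part0
  if part = "" then st
  else if PySem.Str.isIn ":" part = false then st
  else
    let i := PySem.Str.find part ":"
    let code := PySem.Str.upper (PySem.Str.strip (PySem.Str.slice part none (some i)))
    let qty_s := PySem.Str.slice part (some (i + 1)) none
    if code = "" then st
    else
      match PySem.Int.ofStr? (PySem.Str.strip qty_s) with
      | none => st
      | some qty =>
        if qty ≤ 0 then st
        else
          match st.2.get? code with
          | some idx =>
            match PySem.List.pyGet? st.1 idx with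
            | some oc_oq => (PySem.List.pySetD st.1 idx (oc_oq.1, oc_oq.2 + qty), st.2)
            | none => st   -- unreachable in Python: seen always holds a valid index into out
          | none => (st.1 ++ [(code, qty)], st.2.insert code (PySem.List.len st.1))

def parse_deck_query_py (deck_param : String) : List (String × Int) :=
  (((PySem.Str.split? deck_param ",").getD []).foldl pvStepA ([], PySem.Dict.empty)).1

-- ===== PORT B =====
-- Stage 1 loop body of B (same validation steps as A's loop; just appends the pair).
def pvParseStep (pairs : List (String × Int)) (part0 : String) : List (String × Int) :=
  let part := PySem.Str.strip part0
  if part = "" then pairs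
  else if PySem.Str.isIn ":" part = false then pairs
  else
    let i := PySem.Str.find part ":"
    let code := PySem.Str.upper (PySem.Str.strip (PySem.Str.slice part none (some i)))
    let qty_s := PySem.Str.slice part (some (i + 1)) none
    if code = "" then pairs
    else
      match PySem.Int.ofStr? (PySem.Str.strip qty_s) with
      | none => pairs
      | some qty =>
        if 0 < qty then pairs ++ [(code, qty)] else pairs

-- Stage 2 loop body of B: `if all(c != code for c, _ in pairs[:i]): out.append((code, sum(...)))`.
def pvMergeStep (pairs : List (String × Int)) (out : List (String × Int))
    (ip : Int × (String × Int)) : List (String × Int) :=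
  if (PySem.List.slice pairs none (some ip.1)).all (fun q => q.1 ≠ ip.2.1) then
    out ++ [(ip.2.1, ((pairs.filter (fun q => q.1 == ip.2.1)).map Prod.snd).sum)]
  else out

def parse_deck_query_py_alt (deck_param : String) : List (String × Int) :=
  let pairs := ((PySem.Str.split? deck_param ",").getD []).foldl pvParseStep []
  (PySem.List.enumerate pairs).foldl (pvMergeStep pairs) []

-- ===== PRECONDITION & SPEC =====
def Spec_parse_deck_query_py (deck_param : String) (out : List (String × Int)) : Prop := out = parse_deck_query_py_alt deck_param
instance (deck_param : String) (out : List (String × Int)) : Decidable (Spec_parse_deck_query_py deck_param out) := by unfold Spec_parse_deck_query_py; infer_instance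

-- ===== CLAIM (what is proved, stated in full; the proofs are below) =====
def Claim_equal_parse_deck_query_py : Prop := ∀ (deck_param : String), Dom_parse_deck_query_py deck_param → Spec_parse_deck_query_py deck_param (parse_deck_query_py deck_param)

-- ===== LEMMAS AND PROOFS =====

-- total quantity of code c among the parsed pairs (the value B's inner sum computes)
def pvSum (c : String) (pairs : List (String × Int)) : Int :=
  ((pairs.filter (fun q => q.1 == c)).map Prod.snd).sum

-- codes in first-seen order
def pvFirsts (l : List String) : List String :=
  l.foldl (fun acc c => if c ∈ acc then acc else acc ++ [c]) []

-- the merged list both programs compute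
def pvGrp (pairs : List (String × Int)) : List (String × Int) :=
  (pvFirsts (pairs.map Prod.fst)).map (fun c => (c, pvSum c pairs))

lemma pvFirsts_snoc (l : List String) (c : String) :
    pvFirsts (l ++ [c]) = if c ∈ pvFirsts l then pvFirsts l else pvFirsts l ++ [c] := by
  simp [pvFirsts, List.foldl_append]

lemma pv_mem_firsts_aux (l : List String) :
    ∀ (acc : List String) (x : String),
      x ∈ l.foldl (fun acc c => if c ∈ acc then acc else acc ++ [c]) acc ↔ x ∈ acc ∨ x ∈ l := by
  induction l with
  | nil => simp
  | cons a t ih =>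
    intro acc x
    simp only [List.foldl_cons]
    by_cases ha : a ∈ acc
    · rw [if_pos ha, ih]
      constructor
      · rintro (h | h)
        · exact Or.inl h
        · exact Or.inr (List.mem_cons_of_mem _ h)
      · rintro (h | h)
        · exact Or.inl h
        · rcases List.mem_cons.mp h with rfl | h
          · exact Or.inl ha
          · exact Or.inr h
    · rw [if_neg ha, ih]
      simp only [List.mem_append, List.mem_cons]
      tauto

lemma pv_mem_firsts (l : List String) (x : String) : x ∈ pvFirsts l ↔ x ∈ l := by
  rw [pvFirsts, pv_mem_firsts_aux]; simp

lemma pv_nodup_firsts_aux (l : List String) :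
    ∀ (acc : List String), acc.Nodup →
      (l.foldl (fun acc c => if c ∈ acc then acc else acc ++ [c]) acc).Nodup := by
  induction l with
  | nil => intro acc h; simpa using h
  | cons a t ih =>
    intro acc h
    simp only [List.foldl_cons]
    by_cases ha : a ∈ acc
    · rw [if_pos ha]; exact ih acc h
    · rw [if_neg ha]
      refine ih _ ?_
      rw [List.nodup_append]
      refine ⟨h, List.nodup_singleton a, fun b hb c hc => ?_⟩
      have hc2 : c = a := by simpa using hc
      subst hc2
      exact fun he => ha (he ▸ hb)
lemma pv_nodup_firsts (l : List String) : (pvFirsts l).Nodup :=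
  pv_nodup_firsts_aux l [] List.nodup_nil

lemma pvGrp_fst (pairs : List (String × Int)) :
    (pvGrp pairs).map Prod.fst = pvFirsts (pairs.map Prod.fst) := by
  simp [pvGrp, List.map_map, Function.comp_def]

lemma pvSum_snoc_self (c : String) (q : Int) (pairs : List (String × Int)) :
    pvSum c (pairs ++ [(c, q)]) = pvSum c pairs + q := by
  simp [pvSum]

lemma pvSum_snoc_ne {c c' : String} (h : c' ≠ c) (q : Int) (pairs : List (String × Int)) :
    pvSum c' (pairs ++ [(c, q)]) = pvSum c' pairs := by
  simp [pvSum, List.filter_append, Ne.symm h]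

lemma pvSum_of_not_mem {c : String} {pairs : List (String × Int)}
    (h : c ∉ pairs.map Prod.fst) : pvSum c pairs = 0 := by
  have : pairs.filter (fun q => q.1 == c) = [] := by
    rw [List.filter_eq_nil_iff]
    intro p hp hc
    have hpc : p.1 = c := by simpa using hc
    exact h (hpc ▸ List.mem_map_of_mem hp)
  simp [pvSum, this]

-- appending a fresh pair to pairs appends to the merged list
lemma pvGrp_snoc_new {c : String} (q : Int) {pairs : List (String × Int)}
    (h : c ∉ pairs.map Prod.fst) :
    pvGrp (pairs ++ [(c, q)]) = pvGrp pairs ++ [(c, q)] := by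
  have hnf : c ∉ pvFirsts (pairs.map Prod.fst) := fun hm => h ((pv_mem_firsts _ _).mp hm)
  unfold pvGrp
  rw [List.map_append, List.map_cons, List.map_nil, pvFirsts_snoc, if_neg hnf,
    List.map_append]
  congr 1
  · apply List.map_congr_left
    intro c' hc'
    have : c' ≠ c := fun he => hnf (he ▸ hc')
    rw [pvSum_snoc_ne this]
  · simp [pvSum_snoc_self, pvSum_of_not_mem h]

-- appending a duplicate pair updates the merged list in place
lemma pvGrp_snoc_dup {c : String} (q : Int) {pairs : List (String × Int)}
    (h : c ∈ pairs.map Prod.fst) :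
    pvGrp (pairs ++ [(c, q)]) =
      (pvGrp pairs).map (fun p => if p.1 == c then (c, p.2 + q) else p) := by
  have hf : c ∈ pvFirsts (pairs.map Prod.fst) := (pv_mem_firsts _ _).mpr h
  unfold pvGrp
  rw [List.map_append, List.map_cons, List.map_nil, pvFirsts_snoc, if_pos hf, List.map_map]
  apply List.map_congr_left
  intro c' _
  by_cases hc : c' = c
  · subst hc; simp [pvSum_snoc_self]
  · simp [hc, pvSum_snoc_ne hc]

-- index into a list with nodup keys: overwriting at the key's index = mapping the overwrite over the list
lemma pv_set_eq_map {l : List (String × Int)} {n : Nat} {code : String} {v : Int}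
    (hnd : (l.map Prod.fst).Nodup) (hn : n < l.length) (hkey : (l[n]'hn).1 = code) :
    l.set n (code, v) = l.map (fun p => if p.1 == code then (code, v) else p) := by
  induction l generalizing n with
  | nil => simp at hn
  | cons p t ih =>
    obtain ⟨a, b⟩ := p
    simp only [List.map_cons, List.nodup_cons] at hnd
    cases n with
    | zero =>
      simp only [List.getElem_cons_zero] at hkey
      subst hkey
      simp only [List.set_cons_zero, List.map_cons, beq_self_eq_true, if_pos]
      congr 1
      symm
      calc List.map (fun p => if (p.1 == a) = true then (a, v) else p) t
          = List.map id t := by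
            apply List.map_congr_left
            intro q hq
            have hne : q.1 ≠ a := fun he => hnd.1 (he ▸ List.mem_map_of_mem hq)
            simp [hne]
        _ = t := List.map_id t
    | succ m =>
      simp only [List.getElem_cons_succ] at hkey
      have hm : m < t.length := by simpa using hn
      have hmem : code ∈ t.map Prod.fst := hkey ▸ List.mem_map_of_mem (List.getElem_mem hm)
      have hne : a ≠ code := fun h => hnd.1 (h ▸ hmem)
      simp only [List.set_cons_succ, List.map_cons, ih hnd.2 hm hkey]
      simp [hne]

lemma pv_index_append_singleton_of_ne {l : List String} {x c : String} (h : c ≠ x) :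
    PySem.List.index? (l ++ [x]) c = PySem.List.index? l c := by
  by_cases hm : c ∈ l
  · exact PySem.List.index?_append_of_mem _ hm
  · rw [(PySem.List.index?_eq_none_iff _ _).mpr hm,
      (PySem.List.index?_eq_none_iff _ _).mpr (by simp [hm, h])]

-- The loop invariant relating A's state (out, seen) to the pairs B has parsed so far.
def pvInv (st : List (String × Int) × PySem.Dict String Int) (pairs : List (String × Int)) : Prop :=
  st.1 = pvGrp pairs ∧
  (∀ c, st.2.get? c = (PySem.List.index? (st.1.map Prod.fst) c).map (fun n => (n : Int)))

-- one step of A's loop tracks one step of B's stage-1 loop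
lemma pv_step_inv (part0 : String) (st : List (String × Int) × PySem.Dict String Int)
    (pairs : List (String × Int)) (h : pvInv st pairs) :
    pvInv (pvStepA st part0) (pvParseStep pairs part0) := by
  obtain ⟨h1, h2⟩ := h
  simp only [pvStepA, pvParseStep]
  split_ifs with hp hin hc
  · exact ⟨h1, h2⟩
  · exact ⟨h1, h2⟩
  · exact ⟨h1, h2⟩
  · set part := PySem.Str.strip part0 with hpart
    set code := PySem.Str.upper (PySem.Str.strip (PySem.Str.slice part none (some (PySem.Str.find part ":")))) with hcode
    set qty_s := PySem.Str.slice part (some (PySem.Str.find part ":" + 1)) none with hq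
    cases hof : PySem.Int.ofStr? (PySem.Str.strip qty_s) with
    | none => exact ⟨h1, h2⟩
    | some qty =>
      by_cases hqty : qty ≤ 0
      · simp only [if_pos hqty, if_neg (by omega : ¬ 0 < qty)]
        exact ⟨h1, h2⟩
      · simp only [if_neg hqty, if_pos (by omega : 0 < qty)]
        have hfst : st.1.map Prod.fst = pvFirsts (pairs.map Prod.fst) := by
          rw [h1, pvGrp_fst]
        cases hidx : PySem.List.index? (st.1.map Prod.fst) code with
        | none =>
          -- code not seen yet: A appends (code, qty); so does the merged view of pairs
          have hget : st.2.get? code = none := by rw [h2 code, hidx]; rfl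
          have hnm : code ∉ st.1.map Prod.fst := (PySem.List.index?_eq_none_iff _ _).mp hidx
          have hnp : code ∉ pairs.map Prod.fst := fun hm =>
            hnm (hfst ▸ (pv_mem_firsts _ _).mpr hm)
          simp only [hget]
          refine ⟨?_, ?_⟩
          · rw [pvGrp_snoc_new qty hnp, ← h1]
          · intro c
            by_cases hceq : c = code
            · subst hceq
              rw [PySem.Dict.get?_insert_self]
              simp only [List.map_append, List.map_cons, List.map_nil]
              rw [PySem.List.index?_append_singleton_self _ _ hnm]
              simp [PySem.List.len]
            · rw [PySem.Dict.get?_insert_of_ne _ _ hceq, h2 c]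
              simp only [List.map_append, List.map_cons, List.map_nil]
              rw [pv_index_append_singleton_of_ne hceq]
        | some n =>
          -- duplicate code: A overwrites out[n] in place; merged view maps the update over the list
          have hget : st.2.get? code = some (n : Int) := by rw [h2 code, hidx]; rfl
          obtain ⟨hn, hkey, -⟩ := PySem.List.getElem_of_index?_eq_some hidx
          have hn' : n < st.1.length := by simpa using hn
          have hkey' : (st.1[n]'hn').1 = code := by simpa using hkey
          have hpy : PySem.List.pyGet? st.1 (n : Int) = some (st.1[n]'hn') := by
            rw [PySem.List.pyGet?_natCast]
            exact List.getElem?_eq_getElem hn'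
          simp only [hget, hpy]
          have hmp : code ∈ pairs.map Prod.fst := by
            have : code ∈ st.1.map Prod.fst := (PySem.List.index?_isSome_iff _ _).mp (hidx ▸ rfl)
            exact (pv_mem_firsts _ _).mp (hfst ▸ this)
          have hfirst : (pvFirsts (pairs.map Prod.fst))[n]'(hfst ▸ hn) = code := by
            rw [← List.getElem_of_eq hfst hn]; exact hkey
          have hval : (st.1[n]'hn').2 = pvSum code pairs := by
            rw [List.getElem_of_eq h1 hn']
            simp only [pvGrp, List.getElem_map]
            rw [hfirst]
          have hset : PySem.List.pySetD st.1 (n : Int) ((st.1[n]'hn').1, (st.1[n]'hn').2 + qty)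
              = st.1.map (fun p => if p.1 == code then (code, (st.1[n]'hn').2 + qty) else p) := by
            rw [PySem.List.pySetD_natCast,
              show ((st.1[n]'hn').1, (st.1[n]'hn').2 + qty) = (code, (st.1[n]'hn').2 + qty) from
                by rw [hkey']]
            exact pv_set_eq_map (hfst ▸ pv_nodup_firsts _) hn' hkey'
          have hmapfst :
              (st.1.map (fun p => if p.1 == code then (code, (st.1[n]'hn').2 + qty) else p)).map
                Prod.fst = st.1.map Prod.fst := by
            rw [List.map_map]
            apply List.map_congr_left
            intro p _
            by_cases hpc : p.1 = code <;> simp [hpc]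
          refine ⟨?_, ?_⟩
          · show PySem.List.pySetD st.1 (n : Int) ((st.1[n]'hn').1, (st.1[n]'hn').2 + qty)
              = pvGrp (pairs ++ [(code, qty)])
            rw [hset, pvGrp_snoc_dup qty hmp, ← h1]
            apply List.map_congr_left
            intro p hp
            by_cases hpc : p.1 = code
            · have hpn : p = st.1[n]'hn' := by
                obtain ⟨j, hj, hpj⟩ := List.getElem_of_mem hp
                have hj' : j < (st.1.map Prod.fst).length := by simpa using hj
                have hjc : (st.1.map Prod.fst)[j]'hj' = code := by
                  rw [List.getElem_map]; rw [hpj]; exact hpc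
                have hnd : (st.1.map Prod.fst).Nodup := hfst ▸ pv_nodup_firsts _
                have heq : (st.1.map Prod.fst)[j]'hj' = (st.1.map Prod.fst)[n]'hn := by
                  rw [hjc, hkey]
                have hjn : j = n := hnd.getElem_inj_iff.mp heq
                subst hjn
                exact hpj.symm
              rw [hpn]
            · simp [hpc]
          · intro c
            rw [hset, hmapfst]
            exact h2 c

lemma pv_fold_inv (parts : List String) (st : List (String × Int) × PySem.Dict String Int)
    (pairs : List (String × Int)) (h : pvInv st pairs) :
    pvInv (parts.foldl pvStepA st) (parts.foldl pvParseStep pairs) := by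
  induction parts generalizing st pairs with
  | nil => exact h
  | cons p t ih => exact ih _ _ (pv_step_inv p st pairs h)

-- B's stage-2 fold over the first k enumerated pairs builds the merged view of the first k pairs
lemma pv_merge_take (pairs : List (String × Int)) (k : Nat) (hk : k ≤ pairs.length) :
    ((PySem.List.enumerate pairs).take k).foldl (pvMergeStep pairs) [] =
      (pvFirsts ((pairs.take k).map Prod.fst)).map (fun c => (c, pvSum c pairs)) := by
  induction k with
  | zero => simp [pvFirsts]
  | succ m ih =>
    have hm : m < pairs.length := by omega
    have hget : (PySem.List.enumerate pairs)[m]? = some ((m : Int), pairs[m]'hm) := by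
      rw [PySem.List.getElem?_enumerate]
      simp [List.getElem?_eq_getElem hm]
    rw [List.take_succ, hget, Option.toList_some, List.foldl_append, ih (by omega)]
    have htk : (pairs.take (m + 1)).map Prod.fst
        = (pairs.take m).map Prod.fst ++ [(pairs[m]'hm).1] := by
      rw [List.take_succ, List.getElem?_eq_getElem hm, Option.toList_some, List.map_append,
        List.map_cons, List.map_nil]
    simp only [List.foldl_cons, List.foldl_nil, pvMergeStep, PySem.List.slice_to_natCast]
    rw [htk, pvFirsts_snoc]
    by_cases hmem : (pairs[m]'hm).1 ∈ (pairs.take m).map Prod.fst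
    · have hmemf : (pairs[m]'hm).1 ∈ pvFirsts ((pairs.take m).map Prod.fst) :=
        (pv_mem_firsts _ _).mpr hmem
      have hcond : ¬ ((pairs.take m).all (fun q => q.1 ≠ (pairs[m]'hm).1) = true) := by
        simp only [List.all_eq_true, decide_eq_true_eq]
        push Not
        obtain ⟨p, hp, hpe⟩ := List.mem_map.mp hmem
        exact ⟨p, hp, hpe⟩
      rw [if_pos hmemf, if_neg hcond]
    · have hmemf : (pairs[m]'hm).1 ∉ pvFirsts ((pairs.take m).map Prod.fst) :=
        fun hx => hmem ((pv_mem_firsts _ _).mp hx)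
      have hcond : (pairs.take m).all (fun q => q.1 ≠ (pairs[m]'hm).1) = true := by
        simp only [List.all_eq_true, decide_eq_true_eq]
        intro p hp hpe
        exact hmem (hpe ▸ List.mem_map_of_mem hp)
      rw [if_neg hmemf, if_pos hcond, List.map_append]
      rfl

lemma pv_merge_eq (pairs : List (String × Int)) :
    (PySem.List.enumerate pairs).foldl (pvMergeStep pairs) [] = pvGrp pairs := by
  unfold pvGrp
  have h := pv_merge_take pairs pairs.length le_rfl
  rw [List.take_length] at h
  rwa [List.take_of_length_le (by simp [PySem.List.length_enumerate])] at h

-- ===== VERDICT (by name: the statement is the Claim_ definition above) =====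
theorem parse_deck_query_py_spec : Claim_equal_parse_deck_query_py := by
  intro deck_param _
  unfold Spec_parse_deck_query_py parse_deck_query_py parse_deck_query_py_alt
  have h0 : pvInv ([], PySem.Dict.empty) [] := by
    refine ⟨by simp [pvGrp, pvFirsts], ?_⟩
    intro c
    rw [PySem.Dict.get?_empty, (PySem.List.index?_eq_none_iff _ _).mpr (by simp)]
    rfl
  rw [pv_merge_eq]
  exact (pv_fold_inv ((PySem.Str.split? deck_param ",").getD []) _ _ h0).1
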